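-- pv_equiv track=rewrite | github.com/NREL/rlmolecule | examples/crystal_energy/scripts/nrelmatdbtaps.py | split_formula
-- ===== SOURCE A (Python) =====
-- def split_formula(compound):
--     compoundnew = []
--     compoundnew2 = []
--
--     for i in range(len(compound)):
--         if compound[i].isdigit():
--             compoundnew.append(' ')
--             compoundnew2.append(compound[i])
--         else:
--             compoundnew.append(compound[i])
--             compoundnew2.append(' ')
--
--     c2 = "".join(compoundnew)
--     elements = c2.split()
--     numelements = len(elements)
--     c3 = "".join(compoundnew2)
--     stoichiometry = c3.split()
--     return elements, stoichiometry
-- ===== SOURCE B (Python) =====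
-- def split_formula(compound):
--     # One pass: emit maximal digit runs into stoichiometry and maximal
--     # non-digit non-space runs into elements; whitespace just ends a token.
--     elements = []
--     stoichiometry = []
--     cur = []
--     cur_digit = False
--     for ch in compound:
--         if ch.isdigit():
--             if cur and not cur_digit:
--                 elements.append(''.join(cur))
--                 cur = []
--             cur_digit = True
--             cur.append(ch)
--         elif ch.isspace():
--             if cur:
--                 (stoichiometry if cur_digit else elements).append(''.join(cur))
--                 cur = []
--         else:
--             if cur and cur_digit:
--                 stoichiometry.append(''.join(cur))
--                 cur = []
--             cur_digit = False
--             cur.append(ch)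
--     if cur:
--         (stoichiometry if cur_digit else elements).append(''.join(cur))
--     return elements, stoichiometry
-- ===== Notes on version B (the rewrite author's own statement) =====
-- stated objective: alternative
-- what changed: Replaced A's two masked copies of the string plus two whitespace .split() passes by a single-pass tokenizer state machine that classifies each character as digit/whitespace/other and appends finished maximal runs directly to the two output lists.
import Mathlib
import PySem

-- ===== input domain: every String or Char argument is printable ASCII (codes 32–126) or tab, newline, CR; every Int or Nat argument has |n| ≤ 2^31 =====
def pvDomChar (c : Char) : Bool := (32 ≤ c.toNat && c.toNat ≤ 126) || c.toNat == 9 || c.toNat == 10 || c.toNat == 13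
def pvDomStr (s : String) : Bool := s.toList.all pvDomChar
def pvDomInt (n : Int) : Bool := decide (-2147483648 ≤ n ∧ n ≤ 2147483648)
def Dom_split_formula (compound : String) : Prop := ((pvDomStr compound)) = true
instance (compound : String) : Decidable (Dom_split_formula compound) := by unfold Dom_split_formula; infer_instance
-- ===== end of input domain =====

-- B replaces A's two masked string copies + two .split() passes by one tokenizer pass
-- that routes maximal digit runs and maximal non-digit non-space runs directly to the
-- two output lists (objective: alternative decomposition, same O(n) cost).

-- ===== PORT A =====
-- the loop over range(len(compound)) reading compound[i] is ported as a fold over the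
-- character list in the same order, appending to the two accumulator lists exactly as A does
def split_formula (compound : String) : List String × List String :=
  let p := compound.toList.foldl
    (fun (p : List Char × List Char) c =>
      if PySem.Chars.isdigit c then (p.1 ++ [' '], p.2 ++ [c])
      else (p.1 ++ [c], p.2 ++ [' ']))
    ([], [])
  let c2 := String.ofList p.1
  let elements := PySem.Str.split₀ c2
  let c3 := String.ofList p.2
  let stoichiometry := PySem.Str.split₀ c3
  (elements, stoichiometry)

-- ===== PORT B =====
-- tokenizer loop of Source B: state = (elements, stoichiometry, cur, cur_digit)
def splitFormulaTok : List Char → List (List Char) → List (List Char) → List Char → Bool →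
    List (List Char) × List (List Char)
  | [], els, sto, cur, cd =>
    if cur.isEmpty then (els, sto)
    else if cd then (els, sto ++ [cur]) else (els ++ [cur], sto)
  | c :: rest, els, sto, cur, cd =>
    if PySem.Chars.isdigit c then
      if !cur.isEmpty && !cd then splitFormulaTok rest (els ++ [cur]) sto [c] true
      else splitFormulaTok rest els sto (cur ++ [c]) true
    else if PySem.Chars.isspace c then
      if cur.isEmpty then splitFormulaTok rest els sto cur cd
      else if cd then splitFormulaTok rest els (sto ++ [cur]) [] cd
      else splitFormulaTok rest (els ++ [cur]) sto [] cd
    else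
      if !cur.isEmpty && cd then splitFormulaTok rest els (sto ++ [cur]) [c] false
      else splitFormulaTok rest els sto (cur ++ [c]) false

def split_formula_alt (compound : String) : List String × List String :=
  let p := splitFormulaTok compound.toList [] [] [] false
  (p.1.map String.ofList, p.2.map String.ofList)

-- ===== PRECONDITION & SPEC =====
def Spec_split_formula (compound : String) (out : List String × List String) : Prop := out = split_formula_alt compound
instance (compound : String) (out : List String × List String) : Decidable (Spec_split_formula compound out) := by unfold Spec_split_formula; infer_instance

-- ===== CLAIM (what is proved, stated in full; the proofs are below) =====
def Claim_equal_split_formula : Prop := ∀ (compound : String), Dom_split_formula compound → Spec_split_formula compound (split_formula compound)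

-- ===== LEMMAS AND PROOFS =====

theorem sf_isspace_of_isdigit (c : Char) (h : PySem.Chars.isdigit c = true) :
    PySem.Chars.isspace c = false := by
  simp only [PySem.Chars.isdigit, Bool.and_eq_true, decide_eq_true_eq] at h
  have h1 : 48 ≤ c.toNat := Nat.succ_le_of_lt h.1
  have h2 : c.toNat ≤ 57 := h.2
  simp [PySem.Chars.isspace]
  omega

theorem sf_isEmpty_append_singleton {α : Type} (l : List α) (a : α) :
    (l ++ [a]).isEmpty = false := by cases l <;> rfl

theorem sf_foldl_masks (cs : List Char) (a b : List Char) :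
    cs.foldl (fun (p : List Char × List Char) c =>
      if PySem.Chars.isdigit c then (p.1 ++ [' '], p.2 ++ [c])
      else (p.1 ++ [c], p.2 ++ [' '])) (a, b)
    = (a ++ cs.map (fun c => if PySem.Chars.isdigit c then ' ' else c),
       b ++ cs.map (fun c => if PySem.Chars.isdigit c then c else ' ')) := by
  induction cs generalizing a b with
  | nil => simp
  | cons c rest ih =>
    simp only [List.foldl_cons, List.map_cons]
    by_cases h : PySem.Chars.isdigit c = true
    · simp [h, ih]
    · simp [h, ih]

-- the coupling invariant between A's two split₀ scans and B's tokenizer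
theorem sf_main (rest : List Char) (els sto : List (List Char)) (cur : List Char) (cd : Bool) :
    (PySem.Chars.split₀.go (rest.map (fun c => if PySem.Chars.isdigit c then ' ' else c))
        (if cd then [] else cur.reverse) els.reverse,
     PySem.Chars.split₀.go (rest.map (fun c => if PySem.Chars.isdigit c then c else ' '))
        (if cd then cur.reverse else []) sto.reverse)
    = splitFormulaTok rest els sto cur cd := by
  induction rest generalizing els sto cur cd with
  | nil =>
    cases cd <;> cases cur <;>
      simp [splitFormulaTok, PySem.Chars.split₀.go, sf_isEmpty_append_singleton]
  | cons c r ih =>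
    by_cases hd : PySem.Chars.isdigit c = true
    · have hs := sf_isspace_of_isdigit c hd
      have hsp : PySem.Chars.isspace ' ' = true := by decide
      cases cd <;> cases cur <;>
        simp_all [splitFormulaTok, PySem.Chars.split₀.go, sf_isEmpty_append_singleton, ← ih]
    · by_cases hs : PySem.Chars.isspace c = true
      · have hsp : PySem.Chars.isspace ' ' = true := by decide
        cases cd <;> cases cur <;>
          simp_all [splitFormulaTok, PySem.Chars.split₀.go, sf_isEmpty_append_singleton, ← ih]
      · have hsp : PySem.Chars.isspace ' ' = true := by decide
        cases cd <;> cases cur <;>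
          simp_all [splitFormulaTok, PySem.Chars.split₀.go, sf_isEmpty_append_singleton, ← ih]

-- ===== VERDICT (by name: the statement is the Claim_ definition above) =====
theorem split_formula_spec : Claim_equal_split_formula := by
  intro compound _
  unfold Spec_split_formula split_formula split_formula_alt
  simp only [sf_foldl_masks, List.nil_append]
  have h := sf_main compound.toList [] [] [] false
  simp only [List.reverse_nil] at h
  simp only [PySem.Str.split₀]
  cases hp : splitFormulaTok compound.toList [] [] [] false with
  | mk e s =>
    rw [hp] at h
    have h1 := congrArg Prod.fst h
    have h2 := congrArg Prod.snd h
    simp at h1 h2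
    simp [PySem.Chars.split₀, String.toList_ofList, h1, h2]
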